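-- pv_equiv track=rewrite | github.com/einaur/db-tools | db_tools/search.py | get_differing_keys
-- ===== SOURCE A (Python) =====
-- def get_differing_keys(entries):
--     if not entries:
--         return set()
--
--     all_keys = set()
--     for _, inputs, _ in entries:
--         all_keys.update(inputs.keys())
--
--     differing_keys = set()
--
--     for key in all_keys:
--         values = set()
--         for _, inputs, _ in entries:
--             values.add(inputs.get(key, "__MISSING__"))
--         if len(values) > 1:
--             differing_keys.add(key)
--
--     return differing_keys
-- ===== SOURCE B (Python) =====
-- def get_differing_keys(entries):
--     if not entries:
--         return set()
--
--     all_keys = set()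
--     for _, inputs, _ in entries:
--         all_keys.update(inputs.keys())
--
--     common = None
--     for _, inputs, _ in entries:
--         items = {(k, inputs.get(k, "__MISSING__")) for k in all_keys}
--         common = items if common is None else common & items
--
--     return all_keys - {k for k, _ in common}
-- ===== Notes on version B (the rewrite author's own statement) =====
-- stated objective: alternative
-- what changed: Instead of a per-key inner scan over all entries collecting a value set, B folds a running intersection of each entry's normalized (key, value-or-__MISSING__) item-set and returns all_keys minus the keys of that intersection.
import Mathlib
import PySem

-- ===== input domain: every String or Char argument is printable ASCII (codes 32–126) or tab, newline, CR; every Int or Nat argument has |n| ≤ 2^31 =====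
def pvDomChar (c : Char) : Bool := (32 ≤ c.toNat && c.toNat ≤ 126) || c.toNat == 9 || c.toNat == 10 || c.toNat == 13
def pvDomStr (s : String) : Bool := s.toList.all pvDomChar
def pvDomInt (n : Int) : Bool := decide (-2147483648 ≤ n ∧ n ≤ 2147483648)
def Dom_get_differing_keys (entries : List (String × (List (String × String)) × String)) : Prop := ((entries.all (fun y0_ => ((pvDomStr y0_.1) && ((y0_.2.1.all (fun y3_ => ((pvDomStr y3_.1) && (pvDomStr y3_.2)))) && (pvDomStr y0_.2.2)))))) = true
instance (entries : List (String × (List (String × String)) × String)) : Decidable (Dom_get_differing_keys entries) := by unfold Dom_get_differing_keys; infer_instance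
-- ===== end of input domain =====

-- B replaces A's per-key inner scan over all entries by a running intersection of each
-- entry's normalized (key, value-or-"__MISSING__") item-set (alternative decomposition, same cost).


-- ===== PORT A =====
def get_differing_keys (entries : List (String × (List (String × String)) × String)) : List String :=
  if entries = [] then PySem.Set.empty
  else
    let all_keys : PySem.Set String :=
      entries.foldl (fun s e => PySem.Set.update s (PySem.Dict.keys ⟨e.2.1⟩)) PySem.Set.empty
    all_keys.foldl (fun diff key =>
      let values : PySem.Set String :=
        entries.foldl (fun vs e => PySem.Set.add vs (PySem.Dict.getD ⟨e.2.1⟩ key "__MISSING__")) PySem.Set.empty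
      if 1 < PySem.Set.len values then PySem.Set.add diff key else diff) PySem.Set.empty

-- ===== PORT B =====
-- the normalized item-set of one entry's inputs: {(k, inputs.get(k, "__MISSING__")) for k in all_keys}
def pvItems (all_keys : PySem.Set String) (inputs : List (String × String)) : PySem.Set (String × String) :=
  PySem.Set.ofList (all_keys.map (fun k => (k, PySem.Dict.getD ⟨inputs⟩ k "__MISSING__")))

def get_differing_keys_alt (entries : List (String × (List (String × String)) × String)) : List String :=
  match entries with
  | [] => PySem.Set.empty
  | first :: rest =>
    let all_keys : PySem.Set String :=
      (first :: rest).foldl (fun s e => PySem.Set.update s (PySem.Dict.keys ⟨e.2.1⟩)) PySem.Set.empty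
    let common : PySem.Set (String × String) :=
      rest.foldl (fun c e => PySem.Set.inter c (pvItems all_keys e.2.1)) (pvItems all_keys first.2.1)
    PySem.Set.diff all_keys (PySem.Set.ofList (common.map (fun p => p.1)))

-- ===== PRECONDITION & SPEC =====
def Spec_get_differing_keys (entries : List (String × (List (String × String)) × String)) (out : List String) : Prop := out = get_differing_keys_alt entries
instance (entries : List (String × (List (String × String)) × String)) (out : List String) : Decidable (Spec_get_differing_keys entries out) := by unfold Spec_get_differing_keys; infer_instance

-- ===== CLAIM (what is proved, stated in full; the proofs are below) =====
def Claim_equal_get_differing_keys : Prop := ∀ (entries : List (String × (List (String × String)) × String)), Dom_get_differing_keys entries → Spec_get_differing_keys entries (get_differing_keys entries)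

-- ===== LEMMAS AND PROOFS =====

-- abbreviation used only in the proofs: the value an entry's inputs give to `key`
def pvGv (key : String) (inputs : List (String × String)) : String :=
  PySem.Dict.getD ⟨inputs⟩ key "__MISSING__"

theorem pv_len_le_one {α : Type} (l : List α) (a : α) (hnd : l.Nodup)
    (h : ∀ x ∈ l, x = a) : l.length ≤ 1 := by
  match l with
  | [] => simp
  | [_] => simp
  | b :: c :: t =>
    exfalso
    have hb : b = a := h b (by simp)
    have hc : c = a := h c (by simp)
    subst hb; subst hc
    rw [List.nodup_cons] at hnd
    exact hnd.1 (by simp)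

theorem pv_one_lt_length {α : Type} {l : List α} {a b : α}
    (ha : a ∈ l) (hb : b ∈ l) (hne : a ≠ b) : 1 < l.length := by
  match l with
  | [] => simp at ha
  | [c] => simp_all
  | _ :: _ :: _ => simp

theorem pv_foldl_if_add (p : String → Prop) [DecidablePred p] :
    ∀ (l acc : List String), l.Nodup → (∀ x ∈ l, x ∉ acc) →
      l.foldl (fun s k => if p k then PySem.Set.add s k else s) acc
        = acc ++ l.filter (fun k => decide (p k)) := by
  intro l
  induction l with
  | nil => simp
  | cons a t ih =>
    intro acc hnd hdisj
    rw [List.nodup_cons] at hnd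
    by_cases hp : p a
    · have hna : a ∉ acc := hdisj a (by simp)
      have hadd : PySem.Set.add acc a = acc ++ [a] := by
        simp [PySem.Set.add, PySem.Set.contains, hna]
      have := ih (acc ++ [a]) hnd.2 (by
        intro x hx
        simp only [List.mem_append, List.mem_singleton]
        rintro (h | rfl)
        · exact hdisj x (by simp [hx]) h
        · exact hnd.1 hx)
      simp [hp, hadd, this]
    · have := ih acc hnd.2 (fun x hx => hdisj x (by simp [hx]))
      simp [hp, this]

theorem pv_mem_items (AK : PySem.Set String) (inputs : List (String × String))
    (key v : String) :
    (key, v) ∈ pvItems AK inputs ↔ key ∈ AK ∧ v = pvGv key inputs := by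
  simp only [pvItems, PySem.Set.mem_ofList, List.mem_map, pvGv, Prod.mk.injEq]
  constructor
  · rintro ⟨k, hk, rfl, rfl⟩; exact ⟨hk, rfl⟩
  · rintro ⟨hk, rfl⟩; exact ⟨key, hk, rfl, rfl⟩

theorem pv_mem_foldl_inter (AK : PySem.Set String) (x : String × String) :
    ∀ (l : List (String × (List (String × String)) × String)) (c : PySem.Set (String × String)),
      x ∈ l.foldl (fun c e => PySem.Set.inter c (pvItems AK e.2.1)) c
        ↔ x ∈ c ∧ ∀ e ∈ l, x ∈ pvItems AK e.2.1 := by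
  intro l
  induction l with
  | nil => simp
  | cons a t ih =>
    intro c
    rw [List.foldl_cons, ih]
    simp only [PySem.Set.inter, List.mem_filter, PySem.Set.contains, List.elem_iff,
      List.mem_cons]
    constructor
    · rintro ⟨⟨h1, h2⟩, h3⟩
      exact ⟨h1, by rintro e (rfl | he); exacts [h2, h3 e he]⟩
    · rintro ⟨h1, h2⟩
      exact ⟨⟨h1, h2 a (Or.inl rfl)⟩, fun e he => h2 e (Or.inr he)⟩

theorem pv_key_iff (AK : PySem.Set String)
    (first : String × (List (String × String)) × String)
    (rest : List (String × (List (String × String)) × String))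
    (key : String) (hkey : key ∈ AK) :
    (1 : Int) < PySem.Set.len
        ((first :: rest).foldl
          (fun vs e => PySem.Set.add vs (PySem.Dict.getD ⟨e.2.1⟩ key "__MISSING__")) PySem.Set.empty)
      ↔ key ∉ (rest.foldl (fun c e => PySem.Set.inter c (pvItems AK e.2.1))
                  (pvItems AK first.2.1)).map (fun p => p.1) := by
  have hvals : (first :: rest).foldl
      (fun vs e => PySem.Set.add vs (PySem.Dict.getD ⟨e.2.1⟩ key "__MISSING__")) PySem.Set.empty
      = PySem.Set.ofList ((first :: rest).map (fun e => pvGv key e.2.1)) := by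
    simp [PySem.Set.ofList, List.foldl_map, pvGv]
  rw [hvals]
  set a := pvGv key first.2.1 with ha
  have hmem : key ∈ (rest.foldl (fun c e => PySem.Set.inter c (pvItems AK e.2.1))
      (pvItems AK first.2.1)).map (fun p => p.1) ↔ ∀ e ∈ rest, pvGv key e.2.1 = a := by
    constructor
    · intro h
      rw [List.mem_map] at h
      obtain ⟨⟨k, v⟩, hkv, hk⟩ := h
      simp only at hk
      rw [hk] at hkv
      rw [pv_mem_foldl_inter] at hkv
      obtain ⟨h1, h2⟩ := hkv
      rw [pv_mem_items] at h1
      intro e he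
      have := (pv_mem_items AK e.2.1 key v).mp (h2 e he)
      rw [← this.2, h1.2]
    · intro h
      rw [List.mem_map]
      refine ⟨(key, a), ?_, rfl⟩
      rw [pv_mem_foldl_inter]
      refine ⟨(pv_mem_items _ _ _ _).mpr ⟨hkey, rfl⟩, fun e he => ?_⟩
      exact (pv_mem_items _ _ _ _).mpr ⟨hkey, (h e he).symm⟩
  rw [hmem]
  set S := PySem.Set.ofList ((first :: rest).map (fun e => pvGv key e.2.1)) with hS
  have hlen : PySem.Set.len S = (S.length : Int) := rfl
  rw [hlen]
  have hcast : (1 : Int) < (S.length : Int) ↔ 1 < S.length := by exact_mod_cast Iff.rfl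
  rw [hcast]
  constructor
  · intro hlt hall
    have hle : S.length ≤ 1 := by
      apply pv_len_le_one S a (PySem.Set.nodup_ofList _)
      intro x hx
      rw [hS, PySem.Set.mem_ofList, List.mem_map] at hx
      obtain ⟨e, he, rfl⟩ := hx
      rcases List.mem_cons.mp he with rfl | he'
      · rfl
      · exact hall e he'
    omega
  · intro h
    by_contra hle
    push_neg at h
    obtain ⟨e, he, hne⟩ := h
    have h1 : pvGv key e.2.1 ∈ S := by
      rw [hS, PySem.Set.mem_ofList, List.mem_map]; exact ⟨e, by simp [he], rfl⟩
    have h2 : a ∈ S := by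
      rw [hS, PySem.Set.mem_ofList, List.mem_map]; exact ⟨first, by simp, rfl⟩
    exact hle (pv_one_lt_length h1 h2 hne)

theorem pv_nodup_add {α : Type} [BEq α] [LawfulBEq α] (s : PySem.Set α) (x : α)
    (h : s.Nodup) : (PySem.Set.add s x).Nodup := by
  by_cases hx : x ∈ s
  · simpa [PySem.Set.add, PySem.Set.contains, hx]
  · simp only [PySem.Set.add, PySem.Set.contains, List.nodup_append, List.nodup_cons]
    simp only [List.contains_eq_mem, hx, decide_false, if_neg Bool.false_ne_true]
    simp [List.nodup_append, h]
    exact fun a ha hax => hx (hax ▸ ha)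

theorem pv_nodup_update {α : Type} [BEq α] [LawfulBEq α] :
    ∀ (xs : List α) (s : PySem.Set α), s.Nodup → (PySem.Set.update s xs).Nodup := by
  intro xs
  induction xs with
  | nil => intro s h; simpa [PySem.Set.update]
  | cons a t ih =>
    intro s h
    have : PySem.Set.update s (a :: t) = PySem.Set.update (PySem.Set.add s a) t := rfl
    rw [this]
    exact ih _ (pv_nodup_add s a h)

theorem pv_nodup_AK :
    ∀ (l : List (String × (List (String × String)) × String)) (s : PySem.Set String),
      s.Nodup → (l.foldl (fun s e => PySem.Set.update s (PySem.Dict.keys ⟨e.2.1⟩)) s).Nodup := by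
  intro l
  induction l with
  | nil => intro s h; simpa
  | cons a t ih =>
    intro s h
    rw [List.foldl_cons]
    exact ih _ (pv_nodup_update _ s h)

-- ===== VERDICT (by name: the statement is the Claim_ definition above) =====
theorem get_differing_keys_spec : Claim_equal_get_differing_keys := by
  intro entries _
  unfold Spec_get_differing_keys
  cases entries with
  | nil => rfl
  | cons first rest =>
    unfold get_differing_keys get_differing_keys_alt
    simp only [List.cons_ne_self, if_neg (List.cons_ne_nil first rest)]
    set AK : PySem.Set String :=
      (first :: rest).foldl (fun s e => PySem.Set.update s (PySem.Dict.keys ⟨e.2.1⟩)) PySem.Set.empty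
      with hAK
    have hnd : AK.Nodup := pv_nodup_AK _ _ (by simp [PySem.Set.empty])
    rw [pv_foldl_if_add _ AK PySem.Set.empty hnd (by simp [PySem.Set.empty])]
    simp only [List.nil_append, PySem.Set.diff]
    apply List.filter_congr
    intro key hkey
    have hiff := pv_key_iff AK first rest key hkey
    simp only [PySem.Set.contains]
    have h2 : ∀ (m : List String), List.contains (PySem.Set.ofList m) key = decide (key ∈ m) := by
      intro m
      rw [List.contains_eq_mem, decide_eq_decide]
      exact PySem.Set.mem_ofList m key
    rw [h2, ← decide_not, decide_eq_decide]
    exact hiff
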